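-- pv_equiv track=rewrite | github.com/2226171237/Algorithmpractice | 360/test3.py | solve
-- ===== SOURCE A (Python) =====
-- def solve(S):
--     mainS={'A','H','I','M','O','T','U','V','W','X','Y'}
--     i=0
--     j=len(S)-1
--     while i<len(S) and j>=0:
--         if S[i]==S[j] and S[i] in mainS:
--             i+=1
--             j-=1
--         else:
--             return 'NO'
--     return 'YES'
-- ===== SOURCE B (Python) =====
-- def solve(S):
--     mainS = {'A', 'H', 'I', 'M', 'O', 'T', 'U', 'V', 'W', 'X', 'Y'}
--     if all(c in mainS for c in S) and S == S[::-1]: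
--         return 'YES'
--     return 'NO'
-- ===== Notes on version B (the rewrite author's own statement) =====
-- stated objective: simpler
-- what changed: Replaces the converging two-pointer while-loop with early return by two independent whole-string tests: membership of every character in the mirror set and a palindrome check via reversal.
import Mathlib
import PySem

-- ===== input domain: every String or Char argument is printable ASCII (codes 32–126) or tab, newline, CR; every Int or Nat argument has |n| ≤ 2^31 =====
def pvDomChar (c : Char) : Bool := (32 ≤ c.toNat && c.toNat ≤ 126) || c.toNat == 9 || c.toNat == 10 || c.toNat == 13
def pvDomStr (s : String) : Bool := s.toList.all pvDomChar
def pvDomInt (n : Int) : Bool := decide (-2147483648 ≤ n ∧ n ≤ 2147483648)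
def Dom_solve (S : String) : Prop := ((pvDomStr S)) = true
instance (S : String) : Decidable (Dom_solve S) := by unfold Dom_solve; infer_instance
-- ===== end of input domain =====

-- B replaces A's single converging two-pointer loop by two independent whole-string
-- tests (all characters mirrorable, and the string equals its reverse): simpler decomposition.

-- ===== PORT A =====
def pvMainS : PySem.Set Char :=
  PySem.Set.ofList ['A','H','I','M','O','T','U','V','W','X','Y']

-- the while loop; i only ever increases from 0 so it is a Nat, j is Python's int j.
-- At every reachable iteration both indices are in range, where pyGetD is exact.
def solveAux (cs : List Char) (i : Nat) (j : Int) : String :=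
  if h : i < cs.length ∧ 0 ≤ j then
    if PySem.List.pyGetD cs (i : Int) 'A' = PySem.List.pyGetD cs j 'A' ∧
       PySem.Set.contains pvMainS (PySem.List.pyGetD cs (i : Int) 'A') = true then
      solveAux cs (i + 1) (j - 1)
    else "NO"
  else "YES"
termination_by cs.length - i
decreasing_by omega

def solve (S : String) : String :=
  solveAux S.toList 0 ((S.toList.length : Int) - 1)

-- ===== PORT B =====
def pvMirror : PySem.Set Char := PySem.Set.ofList "AHIMOTUVWXY".toList

def solve_alt (S : String) : String :=
  let cs := S.toList
  if (cs.all fun c => PySem.Set.contains pvMirror c) && cs == cs.reverse then "YES"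
  else "NO"

-- ===== PRECONDITION & SPEC =====
def Spec_solve (S : String) (out : String) : Prop := out = solve_alt S
instance (S : String) (out : String) : Decidable (Spec_solve S out) := by unfold Spec_solve; infer_instance

-- ===== CLAIM (what is proved, stated in full; the proofs are below) =====
def Claim_equal_solve : Prop := ∀ (S : String), Dom_solve S → Spec_solve S (solve S)

-- ===== LEMMAS AND PROOFS =====

-- A's loop invariant predicate: the pair condition holds from position i on.
def okFrom (cs : List Char) (i : Nat) : Prop :=
  ∀ k, k < cs.length → i ≤ k →
    cs.getD k 'A' = cs.getD (cs.length - 1 - k) 'A' ∧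
    PySem.Set.contains pvMainS (cs.getD k 'A') = true

lemma solveAux_yes (cs : List Char) (i : Nat) (hi : i ≤ cs.length) :
    solveAux cs i ((cs.length : Int) - 1 - i) = "YES" ↔ okFrom cs i := by
  induction hn : cs.length - i using Nat.strong_induction_on generalizing i with
  | _ n ih =>
    rw [solveAux]
    by_cases hlt : i < cs.length
    · have h0 : (0 : Int) ≤ (cs.length : Int) - 1 - i := by omega
      rw [dif_pos ⟨hlt, h0⟩]
      have hj : PySem.List.pyGetD cs ((cs.length : Int) - 1 - i) 'A' = cs.getD (cs.length - 1 - i) 'A' := by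
        rw [show ((cs.length : Int) - 1 - i) = ((cs.length - 1 - i : Nat) : Int) by omega,
          PySem.List.pyGetD_natCast]
      rw [hj, PySem.List.pyGetD_natCast]
      by_cases hc : cs.getD i 'A' = cs.getD (cs.length - 1 - i) 'A' ∧
          PySem.Set.contains pvMainS (cs.getD i 'A') = true
      · rw [if_pos hc]
        have hrec : ((cs.length : Int) - 1 - i) - 1 = (cs.length : Int) - 1 - (i + 1 : Nat) := by
          push_cast; ring
        rw [hrec, ih (cs.length - (i + 1)) (by omega) (i + 1) (by omega) rfl]
        constructor
        · intro h k hk hik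
          rcases Nat.eq_or_lt_of_le hik with rfl | hik'
          · exact hc
          · exact h k hk hik'
        · intro h k hk hik
          exact h k hk (by omega)
      · rw [if_neg hc]
        constructor
        · intro h; exact absurd h (by decide)
        · intro h; exact absurd (h i hlt le_rfl) hc
    · rw [dif_neg (by omega)]
      constructor
      · intro _ k hk hik; omega
      · intro _; rfl

lemma pvMirror_eq : pvMirror = pvMainS := by decide

lemma okFrom_zero_iff (cs : List Char) :
    okFrom cs 0 ↔ ((cs.all fun c => PySem.Set.contains pvMirror c) && cs == cs.reverse) = true := by
  rw [pvMirror_eq]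
  simp only [Bool.and_eq_true, List.all_eq_true, beq_iff_eq]
  constructor
  · intro h
    constructor
    · intro c hc
      obtain ⟨k, hk, rfl⟩ := List.getElem_of_mem hc
      have := (h k hk (Nat.zero_le k)).2
      rwa [List.getD_eq_getElem cs 'A' hk] at this
    · refine List.ext_getElem (by simp) ?_
      intro k hk hk'
      have := (h k hk (Nat.zero_le k)).1
      rw [List.getD_eq_getElem cs 'A' hk,
        List.getD_eq_getElem cs 'A' (show cs.length - 1 - k < cs.length by omega)] at this
      rw [List.getElem_reverse]
      exact this
  · rintro ⟨hall, hpal⟩ k hk _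
    constructor
    · have : cs[k] = cs.reverse[k]'(by simpa using hk) := List.getElem_of_eq hpal hk
      rw [List.getElem_reverse] at this
      rw [List.getD_eq_getElem cs 'A' hk,
        List.getD_eq_getElem cs 'A' (show cs.length - 1 - k < cs.length by omega)]
      exact this
    · rw [List.getD_eq_getElem cs 'A' hk]
      exact hall _ (List.getElem_mem hk)

lemma solveAux_no (cs : List Char) (i : Nat) (j : Int)
    (hne : solveAux cs i j ≠ "YES") : solveAux cs i j = "NO" := by
  induction hn : cs.length - i using Nat.strong_induction_on generalizing i j with
  | _ n ih =>
    rw [solveAux] at hne ⊢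
    split_ifs at hne ⊢ with h1 h2
    · exact ih (cs.length - (i + 1)) (by omega) (i + 1) (j - 1) hne rfl
    · rfl
    · exact absurd rfl hne

-- ===== VERDICT (by name: the statement is the Claim_ definition above) =====
theorem solve_spec : Claim_equal_solve := by
  intro S _
  unfold Spec_solve solve solve_alt
  have h0 : ((S.toList.length : Int) - 1) = (S.toList.length : Int) - 1 - (0 : Nat) := by
    push_cast; ring
  rw [h0]
  by_cases hb : ((S.toList.all fun c => PySem.Set.contains pvMirror c) && S.toList == S.toList.reverse) = true
  · simp only [hb, if_true]
    exact (solveAux_yes S.toList 0 (Nat.zero_le _)).2 ((okFrom_zero_iff S.toList).2 hb)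
  · simp only [hb]
    exact solveAux_no S.toList 0 _ fun h =>
      hb ((okFrom_zero_iff S.toList).1 ((solveAux_yes S.toList 0 (Nat.zero_le _)).1 h))
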